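-- pv_equiv track=rewrite | github.com/accsc/pyiunstir | pyiunstir/encoding.py | standarize_input
-- ===== SOURCE A (Python) =====
-- def standarize_input(word):
--     ''' Replace several letter combinations with iberian equivalents '''
--
--     changes = [
--         ["j", "i"],
--         ["p", "b"],
--         ["v", "b"],
--         ["tra", "tar"],
--         ["tre", "ter"],
--         ["tri", "tir"],
--         ["tro", "tor"],
--         ["tru", "tur"],
--         ["bra", "bar"],
--         ["bre", "ber"],
--         ["bri", "bir"],
--         ["bro", "bor"],
--         ["bru", "bur"],
--         ["dra", "dar"],
--         ["dre", "der"],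
--         ["dri", "dir"],
--         ["dro", "dor"],
--         ["dru", "dur"],
--         ["kra", "kar"],
--         ["kre", "ker"],
--         ["kri", "kir"],
--         ["kro", "kor"],
--         ["kru", "kur"],
--         ["gra", "gar"],
--         ["gre", "ger"],
--         ["gri", "gir"],
--         ["gro", "gor"],
--         ["gru", "gur"],
--     ]
--
--     for change in changes:
--         word = word.replace(change[0], change[1])
--
--     return word
-- ===== SOURCE B (Python) =====
-- def standarize_input(word):
--     ''' Replace several letter combinations with iberian equivalents '''
--     # one-letter normalisations first (j->i, p->b, v->b), then a single
--     # left-to-right pass doing every consonant+'r'+vowel metathesis at once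
--     s = ['i' if c == 'j' else 'b' if c in 'pv' else c for c in word]
--     out = []
--     i = 0
--     n = len(s)
--     while i < n:
--         if i + 2 < n and s[i] in 'tbdkg' and s[i + 1] == 'r' and s[i + 2] in 'aeiou':
--             out += [s[i], s[i + 2], 'r']
--             i += 3
--         else:
--             out.append(s[i])
--             i += 1
--     return ''.join(out)
-- ===== Notes on version B (the rewrite author's own statement) =====
-- stated objective: alternative
-- what changed: A runs 28 sequential whole-string str.replace passes; B normalises j/p/v in one character map and then performs all 25 consonant-r-vowel metathesis substitutions in a single left-to-right scan (safe because no substitution can create or overlap another match).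
import Mathlib
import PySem

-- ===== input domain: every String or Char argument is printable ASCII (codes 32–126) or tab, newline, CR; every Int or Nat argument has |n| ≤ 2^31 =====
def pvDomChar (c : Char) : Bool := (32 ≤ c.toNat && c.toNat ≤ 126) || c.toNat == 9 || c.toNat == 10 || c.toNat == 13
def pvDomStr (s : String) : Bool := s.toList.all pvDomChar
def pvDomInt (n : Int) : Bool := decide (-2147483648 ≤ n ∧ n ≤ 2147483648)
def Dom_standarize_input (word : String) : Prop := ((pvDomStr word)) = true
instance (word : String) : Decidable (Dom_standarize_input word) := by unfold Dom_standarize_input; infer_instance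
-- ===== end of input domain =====

-- B replaces A's 28 sequential whole-string .replace passes by one normalising character
-- map (j→i, p→b, v→b) followed by a single left-to-right metathesis scan (alternative
-- single-pass algorithm); equivalence of the return value proved for all strings.

-- ===== PORT A =====
def standarize_input (word : String) : String :=
  let changes : List (String × String) :=
    [("j", "i"), ("p", "b"), ("v", "b"),
     ("tra", "tar"), ("tre", "ter"), ("tri", "tir"), ("tro", "tor"), ("tru", "tur"),
     ("bra", "bar"), ("bre", "ber"), ("bri", "bir"), ("bro", "bor"), ("bru", "bur"),
     ("dra", "dar"), ("dre", "der"), ("dri", "dir"), ("dro", "dor"), ("dru", "dur"),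
     ("kra", "kar"), ("kre", "ker"), ("kri", "kir"), ("kro", "kor"), ("kru", "kur"),
     ("gra", "gar"), ("gre", "ger"), ("gri", "gir"), ("gro", "gor"), ("gru", "gur")]
  changes.foldl (fun w change => PySem.Str.replace w change.1 change.2) word

-- ===== PORT B =====
def pvConsonants : List Char := ['t', 'b', 'd', 'k', 'g']

def pvVowels : List Char := ['a', 'e', 'i', 'o', 'u']

def siMap (c : Char) : Char :=
  if c = 'j' then 'i' else if c = 'p' ∨ c = 'v' then 'b' else c

def siScanAux : List Char → List Char → List Char
  | acc, c :: d :: v :: rest =>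
      if c ∈ pvConsonants ∧ d = 'r' ∧ v ∈ pvVowels then siScanAux ('r' :: v :: c :: acc) rest
      else siScanAux (c :: acc) (d :: v :: rest)
  | acc, c :: rest => siScanAux (c :: acc) rest
  | _acc, [] => _acc.reverse
termination_by _ l => l.length

def standarize_input_alt (word : String) : String :=
  String.ofList (siScanAux [] (word.toList.map siMap))

-- ===== PRECONDITION & SPEC =====
def Spec_standarize_input (word : String) (out : String) : Prop := out = standarize_input_alt word
instance (word : String) (out : String) : Decidable (Spec_standarize_input word out) := by unfold Spec_standarize_input; infer_instance

-- ===== CLAIM (what is proved, stated in full; the proofs are below) =====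
def Claim_equal_standarize_input : Prop := ∀ (word : String), Dom_standarize_input word → Spec_standarize_input word (standarize_input word)

-- ===== LEMMAS AND PROOFS =====
def pvRepl (o : Char) (os new : List Char) : List Char → List Char
  | [] => []
  | c :: t =>
      if (o :: os).isPrefixOf (c :: t) then new ++ pvRepl o os new (t.drop os.length)
      else c :: pvRepl o os new t
termination_by l => l.length
decreasing_by all_goals simp

theorem pvGo_eq (o : Char) (os new : List Char) :
    ∀ fuel l acc, l.length ≤ fuel →
      PySem.Chars.replace.go (o :: os) new fuel l acc = acc.reverse ++ pvRepl o os new l := by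
  intro fuel
  induction fuel with
  | zero =>
    intro l acc h
    have : l = [] := List.eq_nil_of_length_eq_zero (Nat.le_zero.mp h)
    subst this
    simp [PySem.Chars.replace.go, pvRepl]
  | succ n ih =>
    intro l acc h
    rcases l with _ | ⟨c, t⟩
    · simp [PySem.Chars.replace.go, pvRepl]
    · rw [PySem.Chars.replace.go]
      by_cases hp : (o :: os).isPrefixOf (c :: t) = true
      · rw [pvRepl]
        simp only [hp, if_pos]
        rw [ih _ _ (by simp at h ⊢; omega)]
        simp
      · rw [pvRepl]
        simp only [hp, if_neg, Bool.false_eq_true, not_false_iff]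
        rw [ih _ _ (by simp at h; omega)]
        simp

theorem replace_eq_pvRepl (o : Char) (os new l : List Char) :
    PySem.Chars.replace l (o :: os) new = pvRepl o os new l := by
  rw [PySem.Chars.replace]
  simp only [List.isEmpty_cons, Bool.false_eq_true, if_neg, not_false_iff]
  simpa using pvGo_eq o os new l.length l [] le_rfl

theorem pvRepl_single (a b : Char) (l : List Char) :
    pvRepl a [] [b] l = l.map (fun c => if c = a then b else c) := by
  induction l with
  | nil => simp [pvRepl]
  | cons c t ih =>
    rw [pvRepl]
    by_cases h : c = a
    · subst h; simp [List.isPrefixOf, ih]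
    · simp [List.isPrefixOf, Ne.symm h, h, ih]

def pvR (p : Char × Char) (l : List Char) : List Char :=
  pvRepl p.1 ['r', p.2] [p.1, p.2, 'r'] l

def pvRules : List (Char × Char) :=
  pvConsonants.flatMap (fun c => pvVowels.map (fun v => (c, v)))

def pvF (rs : List (Char × Char)) (l : List Char) : List Char :=
  rs.foldl (fun l p => pvR p l) l

def pvRV (m : List Char) : Prop := ∃ v t, v ∈ pvVowels ∧ m = 'r' :: v :: t

theorem pvF_nil (rs : List (Char × Char)) : pvF rs [] = [] := by
  induction rs with
  | nil => rfl
  | cons p rs ih => simp only [pvF, List.foldl_cons] at ih ⊢; rw [pvR]; rw [pvRepl]; exact ih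

theorem pvR_head (p : Char × Char) (x : Char) (l : List Char) :
    ∃ t, pvR p (x :: l) = x :: t := by
  rw [pvR, pvRepl]
  by_cases h : (p.1 :: ['r', p.2]).isPrefixOf (x :: l) = true
  · have hx : p.1 = x := by
      rcases List.isPrefixOf_iff_prefix.mp h with ⟨t, ht⟩
      exact (List.cons.injEq ..).mp ht |>.1
    have h2 : ['r', p.2] <+: l := by
      simpa [List.cons_prefix_cons, hx] using List.isPrefixOf_iff_prefix.mp h
    exact ⟨p.2 :: 'r' :: pvRepl p.1 ['r', p.2] [p.1, p.2, 'r'] (l.drop 2), by simp [hx, h2]⟩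
  · exact ⟨pvRepl p.1 ['r', p.2] [p.1, p.2, 'r'] l, by simp [h]⟩

theorem not_prefix_head {a x : Char} (as m : List Char) (h : a ≠ x) :
    ¬ ((a :: as).isPrefixOf (x :: m) = true) := by
  simp [List.isPrefixOf_iff_prefix, List.cons_prefix_cons, h]

theorem pvRepl_skip {o : Char} {os : List Char} (new : List Char) {c : Char} {t : List Char}
    (h : ¬ ((o :: os).isPrefixOf (c :: t) = true)) :
    pvRepl o os new (c :: t) = c :: pvRepl o os new t := by
  rw [pvRepl]; simp [h]

theorem cons_ne_r {c : Char} (h : c ∈ pvConsonants) : c ≠ 'r' := by fin_cases h <;> decide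

theorem r_not_cons : 'r' ∉ pvConsonants := by decide

theorem vow_not_cons {v : Char} (h : v ∈ pvVowels) : v ∉ pvConsonants := by fin_cases h <;> decide

theorem vow_ne_r {v : Char} (h : v ∈ pvVowels) : v ≠ 'r' := by fin_cases h <;> decide

theorem cons_ne_vow {c v : Char} (hc : c ∈ pvConsonants) (hv : v ∈ pvVowels) : c ≠ v := by
  fin_cases hc <;> fin_cases hv <;> decide

theorem pvR_noRV (p : Char × Char) (hp : p.1 ∈ pvConsonants) {m : List Char} (h : ¬ pvRV m) :
    ¬ pvRV (pvR p m) := by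
  rcases m with _ | ⟨d, t⟩
  · rw [pvR, pvRepl]; simp [pvRV]
  · by_cases hd : d = 'r'
    · subst hd
      rw [pvR, pvRepl_skip _ (not_prefix_head _ _ (cons_ne_r hp))]
      rcases t with _ | ⟨y, t2⟩
      · rw [pvRepl]; simp [pvRV]
      · have hy : y ∉ pvVowels := fun hy => h ⟨y, t2, hy, rfl⟩
        obtain ⟨t3, ht3⟩ := pvR_head p y t2
        rw [pvR] at ht3
        rw [ht3]
        rintro ⟨v, t', hv, heq⟩
        obtain ⟨-, rfl, -⟩ : 'r' = 'r' ∧ y = v ∧ t3 = t' := by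
          simpa using heq
        exact hy hv
    · obtain ⟨t3, ht3⟩ := pvR_head p d t
      rw [ht3]
      rintro ⟨v, t', hv, heq⟩
      have : d = 'r' := by
        have := congrArg (fun l => l.head?) heq
        have h2 : d = 'r' := by simpa using this
        exact h2
      exact hd this

theorem pvR_skip_noRV (p : Char × Char) (hp : p.1 ∈ pvConsonants ∧ p.2 ∈ pvVowels)
    {x : Char} {m : List Char} (h : x ∈ pvConsonants → ¬ pvRV m) :
    pvR p (x :: m) = x :: pvR p m := by
  rw [pvR]
  by_cases hpre : ((p.1 :: ['r', p.2]).isPrefixOf (x :: m)) = true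
  · exfalso
    have := List.isPrefixOf_iff_prefix.mp hpre
    rw [List.cons_prefix_cons] at this
    obtain ⟨hx, hrest⟩ := this
    obtain ⟨t', ht'⟩ := hrest
    have hm : m = 'r' :: p.2 :: t' := by simpa using ht'.symm
    exact h (hx ▸ hp.1) ⟨p.2, t', hp.2, hm⟩
  · rw [pvRepl_skip _ hpre]; rfl

theorem pvF_skip (rs : List (Char × Char)) (hrs : ∀ p ∈ rs, p.1 ∈ pvConsonants ∧ p.2 ∈ pvVowels)
    {x : Char} {m : List Char} (h : x ∈ pvConsonants → ¬ pvRV m) :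
    pvF rs (x :: m) = x :: pvF rs m := by
  induction rs generalizing m with
  | nil => rfl
  | cons p rs ih =>
    have hp := hrs p (by simp)
    show pvF rs (pvR p (x :: m)) = x :: pvF rs (pvR p m)
    rw [pvR_skip_noRV p hp h]
    exact ih (fun q hq => hrs q (by simp [hq])) (fun hx => pvR_noRV p hp.1 (h hx))

theorem pvF_match (rs : List (Char × Char)) (hrs : ∀ p ∈ rs, p.1 ∈ pvConsonants ∧ p.2 ∈ pvVowels)
    {c v : Char} (_hc : c ∈ pvConsonants) (hv : v ∈ pvVowels) (hmem : (c, v) ∈ rs)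
    (rest : List Char) :
    pvF rs (c :: 'r' :: v :: rest) = c :: v :: 'r' :: pvF rs rest := by
  induction rs generalizing rest with
  | nil => cases hmem
  | cons p rs ih =>
    have hp := hrs p (by simp)
    have hrs2 : ∀ q ∈ rs, q.1 ∈ pvConsonants ∧ q.2 ∈ pvVowels := fun q hq => hrs q (by simp [hq])
    by_cases hpcv : p = (c, v)
    · subst hpcv
      have hstep : pvR (c, v) (c :: 'r' :: v :: rest) = c :: v :: 'r' :: pvR (c, v) rest := by
        rw [pvR, pvRepl]
        have hpre : (((c, v).1 :: ['r', (c, v).2]).isPrefixOf (c :: 'r' :: v :: rest)) = true := by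
          simp [List.isPrefixOf]
        simp [hpre, pvR]
      show pvF rs (pvR (c, v) (c :: 'r' :: v :: rest)) = c :: v :: 'r' :: pvF rs (pvR (c, v) rest)
      rw [hstep]
      rw [pvF_skip rs hrs2 (fun _ => by rintro ⟨v', t', hv', heq⟩; exact vow_ne_r hv (by simpa using congrArg (fun l => l.head?) heq))]
      rw [pvF_skip rs hrs2 (fun hv' => absurd hv' (vow_not_cons hv))]
      rw [pvF_skip rs hrs2 (fun h' => absurd h' r_not_cons)]
    · have hmem2 : (c, v) ∈ rs := by
        rcases List.mem_cons.mp hmem with h' | h'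
        · exact absurd h'.symm hpcv
        · exact h'
      have hskip1 : ¬ ((p.1 :: ['r', p.2]).isPrefixOf (c :: 'r' :: v :: rest) = true) := by
        intro hpre
        have := List.isPrefixOf_iff_prefix.mp hpre
        rw [List.cons_prefix_cons] at this
        obtain ⟨h1, h2⟩ := this
        rw [List.cons_prefix_cons] at h2
        obtain ⟨-, h3⟩ := h2
        rw [List.cons_prefix_cons] at h3
        exact hpcv (Prod.ext h1 h3.1)
      have hstep : pvR p (c :: 'r' :: v :: rest) = c :: 'r' :: v :: pvR p rest := by
        rw [pvR, pvRepl_skip _ hskip1,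
            pvRepl_skip _ (not_prefix_head _ _ (cons_ne_r hp.1)),
            pvRepl_skip _ (not_prefix_head _ _ (cons_ne_vow hp.1 hv))]
        rfl
      show pvF rs (pvR p (c :: 'r' :: v :: rest)) = c :: v :: 'r' :: pvF rs (pvR p rest)
      rw [hstep]
      exact ih hrs2 hmem2 (pvR p rest)

def pvScan : List Char → List Char
  | c :: d :: v :: rest =>
      if c ∈ pvConsonants ∧ d = 'r' ∧ v ∈ pvVowels then c :: v :: 'r' :: pvScan rest
      else c :: pvScan (d :: v :: rest)
  | c :: rest => c :: pvScan rest
  | [] => []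
termination_by l => l.length

theorem goodRules : ∀ p ∈ pvRules, p.1 ∈ pvConsonants ∧ p.2 ∈ pvVowels := by decide

theorem mem_pvRules {x v : Char} (hx : x ∈ pvConsonants) (hv : v ∈ pvVowels) :
    (x, v) ∈ pvRules := by
  simp only [pvRules, List.mem_flatMap, List.mem_map]
  exact ⟨x, hx, v, hv, rfl⟩

theorem pvF_eq_scan_aux : ∀ n l, l.length ≤ n → pvF pvRules l = pvScan l := by
  intro n
  induction n with
  | zero =>
    intro l h
    obtain rfl := List.eq_nil_of_length_eq_zero (Nat.le_zero.mp h)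
    rw [pvF_nil]; simp [pvScan]
  | succ n ih =>
    intro l h
    match l with
    | [] => rw [pvF_nil]; simp [pvScan]
    | [x] =>
      rw [pvF_skip pvRules goodRules (fun _ => by simp [pvRV]), pvF_nil]
      simp [pvScan]
    | [x, d] =>
      rw [pvF_skip pvRules goodRules (fun _ => by rintro ⟨v, t, -, heq⟩; simp at heq),
          ih [d] (by simp at h ⊢; omega)]
      simp [pvScan]
    | x :: d :: v :: rest =>
      by_cases hm : x ∈ pvConsonants ∧ d = 'r' ∧ v ∈ pvVowels
      · obtain ⟨hx, rfl, hv⟩ := hm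
        rw [pvF_match pvRules goodRules hx hv (mem_pvRules hx hv) rest,
            ih rest (by simp at h ⊢; omega)]
        rw [pvScan]
        simp [hx, hv]
      · have h1 : x ∈ pvConsonants → ¬ pvRV (d :: v :: rest) := by
          intro hx
          rintro ⟨v', t', hv', heq⟩
          obtain ⟨rfl, rfl, -⟩ : d = 'r' ∧ v = v' ∧ rest = t' := by simpa using heq
          exact hm ⟨hx, rfl, hv'⟩
        rw [pvF_skip pvRules goodRules h1, ih (d :: v :: rest) (by simp at h ⊢; omega)]
        rw [pvScan]
        simp [hm]

theorem pvF_eq_scan (l : List Char) : pvF pvRules l = pvScan l :=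
  pvF_eq_scan_aux l.length l le_rfl

theorem siScanAux_eq_aux : ∀ n l acc, l.length ≤ n → siScanAux acc l = acc.reverse ++ pvScan l := by
  intro n
  induction n with
  | zero =>
    intro l acc h
    obtain rfl := List.eq_nil_of_length_eq_zero (Nat.le_zero.mp h)
    simp [siScanAux, pvScan]
  | succ n ih =>
    intro l acc h
    match l with
    | [] =>
      have e : siScanAux acc [] = acc.reverse := by rw [siScanAux.eq_def]
      rw [e]; simp [pvScan]
    | [x] =>
      have e : siScanAux acc [x] = siScanAux (x :: acc) [] := by rw [siScanAux.eq_def]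
      rw [e, ih [] _ (by simp)]
      simp [pvScan]
    | [x, d] =>
      have e : siScanAux acc [x, d] = siScanAux (x :: acc) [d] := by rw [siScanAux.eq_def]
      rw [e, ih [d] _ (by simp at h ⊢; omega)]
      simp [pvScan]
    | x :: d :: v :: rest =>
      have e : siScanAux acc (x :: d :: v :: rest) =
          if x ∈ pvConsonants ∧ d = 'r' ∧ v ∈ pvVowels then siScanAux ('r' :: v :: x :: acc) rest
          else siScanAux (x :: acc) (d :: v :: rest) := by rw [siScanAux.eq_def]
      by_cases hm : x ∈ pvConsonants ∧ d = 'r' ∧ v ∈ pvVowels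
      · rw [e, if_pos hm, ih rest _ (by simp at h ⊢; omega), pvScan, if_pos hm]
        obtain ⟨-, rfl, -⟩ := hm
        simp
      · rw [e, if_neg hm, ih (d :: v :: rest) _ (by simp at h ⊢; omega), pvScan, if_neg hm]
        simp

theorem siScanAux_eq (l acc : List Char) : siScanAux acc l = acc.reverse ++ pvScan l :=
  siScanAux_eq_aux l.length l acc le_rfl

theorem maps_eq (l : List Char) :
    pvRepl 'v' [] ['b'] (pvRepl 'p' [] ['b'] (pvRepl 'j' [] ['i'] l)) = l.map siMap := by
  rw [pvRepl_single, pvRepl_single, pvRepl_single, List.map_map, List.map_map]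
  apply List.map_congr_left
  intro c _
  simp only [Function.comp, siMap]
  by_cases hj : c = 'j'
  · subst hj; decide
  · by_cases hp : c = 'p'
    · subst hp; decide
    · by_cases hv : c = 'v'
      · subst hv; decide
      · simp [hj, hp, hv]

theorem A_toList (w : String) :
    (standarize_input w).toList = pvF pvRules (w.toList.map siMap) := by
  show (standarize_input w).toList = _
  unfold standarize_input
  simp only [List.foldl_cons, List.foldl_nil, PySem.Str.toList_replace]
  simp only [show ("b" : String).toList = ['b'] from rfl, show ("bar" : String).toList = ['b', 'a', 'r'] from rfl, show ("ber" : String).toList = ['b', 'e', 'r'] from rfl, show ("bir" : String).toList = ['b', 'i', 'r'] from rfl, show ("bor" : String).toList = ['b', 'o', 'r'] from rfl, show ("bra" : String).toList = ['b', 'r', 'a'] from rfl, show ("bre" : String).toList = ['b', 'r', 'e'] from rfl, show ("bri" : String).toList = ['b', 'r', 'i'] from rfl, show ("bro" : String).toList = ['b', 'r', 'o'] from rfl, show ("bru" : String).toList = ['b', 'r', 'u'] from rfl, show ("bur" : String).toList = ['b', 'u', 'r'] from rfl, show ("dar" : String).toList = ['d', 'a', 'r'] from rfl, show ("der" : String).toList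 = ['d', 'e', 'r'] from rfl, show ("dir" : String).toList = ['d', 'i', 'r'] from rfl, show ("dor" : String).toList = ['d', 'o', 'r'] from rfl, show ("dra" : String).toList = ['d', 'r', 'a'] from rfl, show ("dre" : String).toList = ['d', 'r', 'e'] from rfl, show ("dri" : String).toList = ['d', 'r', 'i'] from rfl, show ("dro" : String).toList = ['d', 'r', 'o'] from rfl, show ("dru" : String).toList = ['d', 'r', 'u'] from rfl, show ("dur" : String).toList = ['d', 'u', 'r'] from rfl, show ("gar" : String).toList = ['g', 'a', 'r'] from rfl, show ("ger" : String).toList = ['g', 'e', 'r'] from rfl, show ("gir" : String).toList = ['g', 'i', 'r'] from rfl, show ("gor" : String).toList = ['g', 'o', 'r'] from rfl, show ("gra" : String).toList = ['g', 'r', 'a'] from rfl, show ("gre" : String).toList = ['g', 'r', 'e'] from rfl, show ("gri" : String).toList = ['g', 'r', 'i'] from rfl, show ("gro" : String).toList = ['g', 'r', 'o'] from rfl, show ("gru" : String).toList = ['g', 'r', 'u'] from rfl, show ("gur" : String).toList = ['g', 'u', 'r'] from rfl, show ("i" : String).toList = ['i'] from rfl, show ("j" : String).toList = ['j'] from rfl,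 show ("kar" : String).toList = ['k', 'a', 'r'] from rfl, show ("ker" : String).toList = ['k', 'e', 'r'] from rfl, show ("kir" : String).toList = ['k', 'i', 'r'] from rfl, show ("kor" : String).toList = ['k', 'o', 'r'] from rfl, show ("kra" : String).toList = ['k', 'r', 'a'] from rfl, show ("kre" : String).toList = ['k', 'r', 'e'] from rfl, show ("kri" : String).toList = ['k', 'r', 'i'] from rfl, show ("kro" : String).toList = ['k', 'r', 'o'] from rfl, show ("kru" : String).toList = ['k', 'r', 'u'] from rfl, show ("kur" : String).toList = ['k', 'u', 'r'] from rfl, show ("p" : String).toList = ['p'] from rfl, show ("tar" : String).toList = ['t', 'a', 'r'] from rfl, show ("ter" : String).toList = ['t', 'e', 'r'] from rfl, show ("tir" : String).toList = ['t', 'i', 'r'] from rfl, show ("tor" : String).toList = ['t', 'o', 'r'] from rfl, show ("tra" : String).toList = ['t', 'r', 'a'] from rfl, show ("tre" : String).toList = ['t', 'r', 'e'] from rfl, show ("tri" : String).toList = ['t', 'r', 'i'] from rfl, show ("tro" : String).toList = ['t', 'r', 'o'] from rfl, show ("tru" : String).toList = ['t', 'r', 'u'] from rfl, show ("tur" : String).toList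 = ['t', 'u', 'r'] from rfl, show ("v" : String).toList = ['v'] from rfl]
  simp only [replace_eq_pvRepl]
  rw [maps_eq]
  rfl

-- ===== VERDICT (by name: the statement is the Claim_ definition above) =====
theorem standarize_input_spec : Claim_equal_standarize_input := by
  intro word _
  unfold Spec_standarize_input standarize_input_alt
  apply String.toList_inj.mp
  rw [A_toList, String.toList_ofList, siScanAux_eq, pvF_eq_scan]
  rfl
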